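-- pv_equiv track=rewrite | github.com/Kawsar-Rahman09/Corona-virus-Mutation-Analyzer | project_up1.py | compare_sequences
-- ===== SOURCE A (Python) =====
-- def compare_sequences(ref_seq, var_seq):
--     mutations = []
--     mutation_counts = {
--         "Substitution": 0,
--         "Insertion": 0,
--         "Deletion": 0
--     }
--
--     max_len = max(len(ref_seq), len(var_seq))
--
--     for i in range(max_len):
--         ref_residue = ref_seq[i] if i < len(ref_seq) else "-"
--         var_residue = var_seq[i] if i < len(var_seq) else "-"
--
--         if ref_residue == var_residue:
--             continue
--
--         if ref_residue == "-":
--             mut_type = "Insertion"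
--         elif var_residue == "-":
--             mut_type = "Deletion"
--         else:
--             mut_type = "Substitution"
--
--         mutations.append((i + 1, ref_residue, var_residue, mut_type))
--         mutation_counts[mut_type] += 1
--
--     return mutations, mutation_counts
-- ===== SOURCE B (Python) =====
-- def compare_sequences(ref_seq, var_seq):
--     n = min(len(ref_seq), len(var_seq))
--     mutations = []
--     mutation_counts = {"Substitution": 0, "Insertion": 0, "Deletion": 0}
--     # Phase 1: overlapping region only
--     for i in range(n):
--         r, v = ref_seq[i], var_seq[i]
--         if r != v:
--             if r == "-":
--                 t = "Insertion"
--             elif v == "-":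
--                 t = "Deletion"
--             else:
--                 t = "Substitution"
--             mutations.append((i + 1, r, v, t))
--             mutation_counts[t] += 1
--     # Phase 2: the unmatched tail of the longer sequence is pure deletions
--     # (ref longer) or pure insertions (var longer); literal '-' characters in
--     # the tail compare equal to the pad and are skipped, so the count is a
--     # closed form: len(tail) - tail.count('-').
--     if len(ref_seq) > n:
--         tail = ref_seq[n:]
--         mutations.extend((n + 1 + j, c, "-", "Deletion") for j, c in enumerate(tail) if c != "-")
--         mutation_counts["Deletion"] += len(tail) - tail.count("-")
--     elif len(var_seq) > n:
--         tail = var_seq[n:]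
--         mutations.extend((n + 1 + j, "-", c, "Insertion") for j, c in enumerate(tail) if c != "-")
--         mutation_counts["Insertion"] += len(tail) - tail.count("-")
--     return mutations, mutation_counts
-- ===== Notes on version B (the rewrite author's own statement) =====
-- stated objective: alternative
-- what changed: B replaces A's single padded scan over range(max(len)) by a region split: one loop over the overlapping prefix only, then the unmatched tail of the longer sequence handled separately as pure deletions (or insertions) with its count obtained in closed form as len(tail) - tail.count('-').
import Mathlib
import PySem

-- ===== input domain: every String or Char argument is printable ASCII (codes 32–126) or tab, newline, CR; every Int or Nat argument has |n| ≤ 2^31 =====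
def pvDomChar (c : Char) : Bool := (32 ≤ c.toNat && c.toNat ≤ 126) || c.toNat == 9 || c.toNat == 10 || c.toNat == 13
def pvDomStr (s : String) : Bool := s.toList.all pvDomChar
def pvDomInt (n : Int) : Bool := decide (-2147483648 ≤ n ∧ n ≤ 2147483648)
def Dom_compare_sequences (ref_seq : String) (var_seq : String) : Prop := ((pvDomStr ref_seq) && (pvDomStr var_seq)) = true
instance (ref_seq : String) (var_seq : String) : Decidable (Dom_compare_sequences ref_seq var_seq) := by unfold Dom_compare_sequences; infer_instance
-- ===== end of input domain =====

-- B splits the work by region instead of A's single padded scan: one loop over the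
-- overlapping prefix only, then the unmatched tail of the longer string handled as pure
-- deletions/insertions with a closed-form count (len(tail) - tail.count('-'))
-- (objective: alternative; same cost).

-- ===== PORT A =====
def compare_sequences (ref_seq : String) (var_seq : String) : (List (Int × String × String × String)) × (List (String × Int)) :=
  let ref := ref_seq.toList
  let var := var_seq.toList
  let max_len : Int := max (ref.length : Int) (var.length : Int)
  let res := (PySem.List.pyRange 0 max_len 1).foldl
    (fun (st : (List (Int × String × String × String)) × PySem.Dict String Int) i =>
      let ref_residue : Char := if i < (ref.length : Int) then PySem.List.pyGetD ref i '-' else '-'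
      let var_residue : Char := if i < (var.length : Int) then PySem.List.pyGetD var i '-' else '-'
      if ref_residue = var_residue then st
      else
        let mut_type : String :=
          if ref_residue = '-' then "Insertion"
          else if var_residue = '-' then "Deletion"
          else "Substitution"
        (st.1 ++ [(i + 1, String.ofList [ref_residue], String.ofList [var_residue], mut_type)],
         st.2.insert mut_type (st.2.getD mut_type 0 + 1)))
    ([], PySem.Dict.ofList [("Substitution", 0), ("Insertion", 0), ("Deletion", 0)])
  (res.1, res.2.items)

-- ===== PORT B =====
def compare_sequences_alt (ref_seq : String) (var_seq : String) : (List (Int × String × String × String)) × (List (String × Int)) :=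
  let as := ref_seq.toList
  let bs := var_seq.toList
  let n : Nat := min as.length bs.length
  -- Phase 1: overlapping region only
  let st := (PySem.List.pyRange 0 (n : Int) 1).foldl
    (fun (st : (List (Int × String × String × String)) × PySem.Dict String Int) i =>
      let r := PySem.List.pyGetD as i '-'
      let v := PySem.List.pyGetD bs i '-'
      if r != v then
        let t : String := if r = '-' then "Insertion" else if v = '-' then "Deletion" else "Substitution"
        (st.1 ++ [(i + 1, String.ofList [r], String.ofList [v], t)], st.2.insert t (st.2.getD t 0 + 1))
      else st)
    ([], PySem.Dict.ofList [("Substitution", 0), ("Insertion", 0), ("Deletion", 0)])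
  -- Phase 2: the unmatched tail of the longer sequence; '-' chars equal the pad and are skipped
  let res :=
    if as.length > n then
      let tail := as.drop n
      (st.1 ++ ((PySem.List.enumerate tail 0).filter (fun p => p.2 != '-')).map
          (fun p => ((n : Int) + 1 + p.1, String.ofList [p.2], "-", ("Deletion" : String))),
       st.2.insert "Deletion" (st.2.getD "Deletion" 0 + ((tail.length : Int) - (PySem.List.count tail '-' : Int))))
    else if bs.length > n then
      let tail := bs.drop n
      (st.1 ++ ((PySem.List.enumerate tail 0).filter (fun p => p.2 != '-')).map
          (fun p => ((n : Int) + 1 + p.1, "-", String.ofList [p.2], ("Insertion" : String))),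
       st.2.insert "Insertion" (st.2.getD "Insertion" 0 + ((tail.length : Int) - (PySem.List.count tail '-' : Int))))
    else st
  (res.1, res.2.items)

-- ===== PRECONDITION & SPEC =====
def Spec_compare_sequences (ref_seq : String) (var_seq : String) (out : (List (Int × String × String × String)) × (List (String × Int))) : Prop := out = compare_sequences_alt ref_seq var_seq
instance (ref_seq : String) (var_seq : String) (out : (List (Int × String × String × String)) × (List (String × Int))) : Decidable (Spec_compare_sequences ref_seq var_seq out) := by unfold Spec_compare_sequences; infer_instance

-- ===== CLAIM (what is proved, stated in full; the proofs are below) =====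
def Claim_equal_compare_sequences : Prop := ∀ (ref_seq : String) (var_seq : String), Dom_compare_sequences ref_seq var_seq → Spec_compare_sequences ref_seq var_seq (compare_sequences ref_seq var_seq)

-- ===== LEMMAS AND PROOFS =====

-- itertools-style zip-with-padding, used only as a proof device (a canonical form both
-- programs are reduced to)
def pvZipLongest : List Char → List Char → List (Char × Char)
  | [], [] => []
  | [], b :: bs => ('-', b) :: pvZipLongest [] bs
  | a :: as, [] => (a, '-') :: pvZipLongest as []
  | a :: as, b :: bs => (a, b) :: pvZipLongest as bs

def pvClassify (r v : Char) : String :=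
  if r = '-' then "Insertion" else if v = '-' then "Deletion" else "Substitution"

def pvMuts (ps : List (Int × Char × Char)) : List (Int × String × String × String) :=
  (ps.filter (fun p => p.2.1 != p.2.2)).map
    (fun p => (p.1, String.ofList [p.2.1], String.ofList [p.2.2], pvClassify p.2.1 p.2.2))

def pvIncr (d : PySem.Dict String Int) (m : Int × String × String × String) : PySem.Dict String Int :=
  d.insert m.2.2.2 (d.getD m.2.2.2 0 + 1)

def pvInit : PySem.Dict String Int := PySem.Dict.ofList [("Substitution", 0), ("Insertion", 0), ("Deletion", 0)]

-- the loop body both programs share on an (index, pair) element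
def pvStep (st : (List (Int × String × String × String)) × PySem.Dict String Int)
    (p : Int × Char × Char) : (List (Int × String × String × String)) × PySem.Dict String Int :=
  if p.2.1 = p.2.2 then st
  else (st.1 ++ [(p.1 + 1, String.ofList [p.2.1], String.ofList [p.2.2], pvClassify p.2.1 p.2.2)],
        st.2.insert (pvClassify p.2.1 p.2.2) (st.2.getD (pvClassify p.2.1 p.2.2) 0 + 1))

theorem pvZip_length : ∀ (as bs : List Char), (pvZipLongest as bs).length = max as.length bs.length
  | [], [] => by simp [pvZipLongest]
  | [], b :: bs => by
    have h := pvZip_length [] bs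
    simp only [pvZipLongest, List.length_cons, List.length_nil, h]; omega
  | a :: as, [] => by
    have h := pvZip_length as []
    simp only [pvZipLongest, List.length_cons, List.length_nil, h]; omega
  | a :: as, b :: bs => by
    have h := pvZip_length as bs
    simp only [pvZipLongest, List.length_cons, h]; omega
termination_by as bs => as.length + bs.length
decreasing_by all_goals (simp only [List.length_cons, List.length_nil]; omega)

theorem pvZip_getD : ∀ (as bs : List Char) (j : Nat),
    (pvZipLongest as bs).getD j ('-', '-') = (as.getD j '-', bs.getD j '-')
  | [], [], j => by cases j <;> simp [pvZipLongest]
  | [], _ :: bs, 0 => by simp [pvZipLongest]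
  | [], _ :: bs, j + 1 => by simpa [pvZipLongest] using pvZip_getD [] bs j
  | _ :: as, [], 0 => by simp [pvZipLongest]
  | _ :: as, [], j + 1 => by simpa [pvZipLongest] using pvZip_getD as [] j
  | _ :: as, _ :: bs, 0 => by simp [pvZipLongest]
  | _ :: as, _ :: bs, j + 1 => by simpa [pvZipLongest] using pvZip_getD as bs j
termination_by as bs _ => as.length + bs.length
decreasing_by all_goals (simp only [List.length_cons, List.length_nil]; omega)

-- split the padded zip into the true zip plus the leftover tail of the longer list
theorem pvZip_split : ∀ (as bs : List Char),
    pvZipLongest as bs = as.zip bs ++ pvZipLongest (as.drop bs.length) (bs.drop as.length)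
  | [], [] => by simp [pvZipLongest]
  | [], b :: bs => by simp [pvZipLongest]
  | a :: as, [] => by simp [pvZipLongest]
  | a :: as, b :: bs => by
    simp only [List.zip_cons_cons, pvZipLongest, List.cons_append]
    exact congrArg _ (pvZip_split as bs)

theorem pvZip_left : ∀ (as : List Char), pvZipLongest as [] = as.map (fun c => (c, '-'))
  | [] => by simp [pvZipLongest]
  | a :: as => by simp only [pvZipLongest, List.map_cons]; exact congrArg _ (pvZip_left as)

theorem pvZip_right : ∀ (bs : List Char), pvZipLongest [] bs = bs.map (fun c => ('-', c))
  | [] => by simp [pvZipLongest]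
  | b :: bs => by simp only [pvZipLongest, List.map_cons]; exact congrArg _ (pvZip_right bs)

-- A's fused loop = build-the-list-then-count, over any pair list
theorem pvFuse (xs : List (Char × Char)) (s : Int)
    (m : List (Int × String × String × String)) (d : PySem.Dict String Int) :
    (PySem.List.enumerate xs s).foldl pvStep (m, d)
      = (m ++ pvMuts (PySem.List.enumerate xs (s + 1)),
         (pvMuts (PySem.List.enumerate xs (s + 1))).foldl pvIncr d) := by
  induction xs generalizing s m d with
  | nil => simp [PySem.List.enumerate_nil, pvMuts]
  | cons p xs ih =>
    obtain ⟨r, v⟩ := p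
    rw [PySem.List.enumerate_cons, PySem.List.enumerate_cons]
    by_cases h : r = v
    · have hstep : pvStep (m, d) (s, (r, v)) = (m, d) := by simp [pvStep, h]
      simp only [List.foldl_cons]
      rw [hstep, ih]
      simp [pvMuts, h]
    · have hstep : pvStep (m, d) (s, (r, v))
          = (m ++ [(s + 1, String.ofList [r], String.ofList [v], pvClassify r v)],
             d.insert (pvClassify r v) (d.getD (pvClassify r v) 0 + 1)) := by
        simp [pvStep, h]
      simp only [List.foldl_cons]
      rw [hstep, ih]
      simp [pvMuts, h, pvIncr, List.append_assoc]

-- canonical form of A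
theorem pvA_canon (ref_seq var_seq : String) :
    compare_sequences ref_seq var_seq =
      (pvMuts (PySem.List.enumerate (pvZipLongest ref_seq.toList var_seq.toList) 1),
       ((pvMuts (PySem.List.enumerate (pvZipLongest ref_seq.toList var_seq.toList) 1)).foldl pvIncr pvInit).items) := by
  unfold compare_sequences
  simp only []
  set as := ref_seq.toList with has
  set bs := var_seq.toList with hbs
  set zs := pvZipLongest as bs with hzs
  have hlen : (max (as.length : Int) (bs.length : Int)) = PySem.List.len zs := by
    simp [PySem.List.len, hzs, pvZip_length, Nat.cast_max]
  rw [hlen]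
  have hcongr :
      (PySem.List.pyRange 0 (PySem.List.len zs) 1).foldl
        (fun (st : (List (Int × String × String × String)) × PySem.Dict String Int) i =>
          let ref_residue : Char := if i < (as.length : Int) then PySem.List.pyGetD as i '-' else '-'
          let var_residue : Char := if i < (bs.length : Int) then PySem.List.pyGetD bs i '-' else '-'
          if ref_residue = var_residue then st
          else
            let mut_type : String :=
              if ref_residue = '-' then "Insertion"
              else if var_residue = '-' then "Deletion"
              else "Substitution"
            (st.1 ++ [(i + 1, String.ofList [ref_residue], String.ofList [var_residue], mut_type)],
             st.2.insert mut_type (st.2.getD mut_type 0 + 1)))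
        ([], PySem.Dict.ofList [("Substitution", 0), ("Insertion", 0), ("Deletion", 0)])
      = (PySem.List.pyRange 0 (PySem.List.len zs) 1).foldl
          (fun st i => pvStep st (i, PySem.List.pyGetD zs i ('-', '-')))
          ([], PySem.Dict.ofList [("Substitution", 0), ("Insertion", 0), ("Deletion", 0)]) := by
    apply PySem.List.foldl_congr_mem
    intro acc i hi
    have hb := (PySem.List.mem_pyRange_one).mp hi
    have h0 : (0 : Int) ≤ i := hb.1
    have hr : (if i < (as.length : Int) then PySem.List.pyGetD as i '-' else '-') = as.getD i.toNat '-' := by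
      split_ifs with h
      · exact PySem.List.pyGetD_of_nonneg as '-' h0
      · rw [List.getD_eq_default]; omega
    have hv : (if i < (bs.length : Int) then PySem.List.pyGetD bs i '-' else '-') = bs.getD i.toNat '-' := by
      split_ifs with h
      · exact PySem.List.pyGetD_of_nonneg bs '-' h0
      · rw [List.getD_eq_default]; omega
    have hz : PySem.List.pyGetD zs i ('-', '-') = (as.getD i.toNat '-', bs.getD i.toNat '-') := by
      rw [PySem.List.pyGetD_of_nonneg zs ('-', '-') h0, pvZip_getD]
    simp only [hr, hv, pvStep, hz, pvClassify]
  rw [hcongr]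
  rw [show (PySem.List.pyRange 0 (PySem.List.len zs) 1).foldl
        (fun st i => pvStep st (i, PySem.List.pyGetD zs i ('-', '-')))
        ([], PySem.Dict.ofList [("Substitution", 0), ("Insertion", 0), ("Deletion", 0)])
      = (PySem.List.enumerate zs 0).foldl pvStep
        ([], PySem.Dict.ofList [("Substitution", 0), ("Insertion", 0), ("Deletion", 0)]) by
    rw [PySem.List.enumerate_eq_map_pyRange zs ('-', '-'), List.foldl_map]]
  rw [pvFuse]
  simp only [pvInit, List.nil_append, zero_add]

-- the getD of zip within range
theorem pvZipPair_getD (as bs : List Char) (j : Nat) (h : j < min as.length bs.length) :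
    (as.zip bs).getD j ('-', '-') = (as.getD j '-', bs.getD j '-') := by
  have h1 : j < as.length := lt_of_lt_of_le h (Nat.min_le_left _ _)
  have h2 : j < bs.length := lt_of_lt_of_le h (Nat.min_le_right _ _)
  have hz : j < (as.zip bs).length := by rw [List.length_zip]; omega
  rw [List.getD_eq_getElem _ _ hz, List.getD_eq_getElem _ _ h1, List.getD_eq_getElem _ _ h2,
    List.getElem_zip]

-- inserting back the value already present is a no-op
theorem pvInsert_noop (d : PySem.Dict String Int) (k : String)
    (hk : d.contains k = true) (hnd : d.keys.Nodup) : d.insert k (d.getD k 0) = d := by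
  apply PySem.Dict.ext
  rw [PySem.Dict.items_insert_of_contains d _ hk]
  have : ∀ p ∈ d.items, (if (p.1 == k) = true then (k, d.getD k 0) else p) = id p := by
    intro p hp
    obtain ⟨p1, p2⟩ := p
    by_cases h : p1 = k
    · subst h
      have := PySem.Dict.getD_of_mem_items d hp hnd 0
      simp [this]
    · simp [h]
  rw [List.map_congr_left this, List.map_id]

-- contains is preserved by the counting fold
theorem pvContains_foldl (k : String) : ∀ (ms : List (Int × String × String × String))
    (d : PySem.Dict String Int), d.contains k = true → (ms.foldl pvIncr d).contains k = true
  | [], _, h => h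
  | m :: ms, d, h => by
    rw [List.foldl_cons]
    exact pvContains_foldl k ms _ (by simp [pvIncr, PySem.Dict.contains_insert, h])

-- counting a run of same-typed mutations is one bulk insert
theorem pvFoldIncr_const (k : String) : ∀ (ms : List (Int × String × String × String))
    (d : PySem.Dict String Int), (∀ m ∈ ms, m.2.2.2 = k) → d.contains k = true → d.keys.Nodup →
    ms.foldl pvIncr d = d.insert k (d.getD k 0 + (ms.length : Int))
  | [], d, _, hk, hnd => by simpa using (pvInsert_noop d k hk hnd).symm
  | m :: ms, d, hall, hk, hnd => by
    rw [List.foldl_cons]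
    have hm : m.2.2.2 = k := hall m (List.mem_cons_self ..)
    have h1 : pvIncr d m = d.insert k (d.getD k 0 + 1) := by simp [pvIncr, hm]
    rw [h1, pvFoldIncr_const k ms _ (fun x hx => hall x (List.mem_cons_of_mem _ hx))
      (by simp) (PySem.Dict.nodup_keys_insert _ _ _ hnd)]
    rw [PySem.Dict.getD_insert_self, PySem.Dict.insert_insert_self]
    congr 1
    simp only [List.length_cons]
    push_cast
    ring

-- the filtered tail has length len - count '-'
theorem pvFilter_len_nat : ∀ (cs : List Char) (t : Int),
    ((PySem.List.enumerate cs t).filter (fun p => p.2 != '-')).length + List.count '-' cs = cs.length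
  | [], _ => by simp [PySem.List.enumerate_nil]
  | c :: cs, t => by
    have ih := pvFilter_len_nat cs (t + 1)
    rw [PySem.List.enumerate_cons]
    by_cases h : c = '-'
    · subst h
      simp only [List.filter_cons, List.count_cons, List.length_cons]
      norm_num
      omega
    · simp only [List.filter_cons, List.count_cons, List.length_cons]
      have hb : (((t, c).2 : Char) != '-') = true := by simpa using h
      rw [hb]
      simp only [if_true, List.length_cons, beq_iff_eq, h, if_false]
      omega

theorem pvFilter_len (cs : List Char) (t : Int) :
    (((PySem.List.enumerate cs t).filter (fun p => p.2 != '-')).length : Int)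
      = (cs.length : Int) - (PySem.List.count cs '-' : Int) := by
  have h := pvFilter_len_nat cs t
  rw [PySem.List.count_eq]
  omega

-- the deletion tail's mutation list, in B's shape
theorem pvTailMutsD : ∀ (cs : List Char) (s t : Int),
    pvMuts (PySem.List.enumerate (cs.map (fun c => (c, '-'))) (s + t))
      = ((PySem.List.enumerate cs t).filter (fun p => p.2 != '-')).map
          (fun p => (s + p.1, String.ofList [p.2], "-", ("Deletion" : String)))
  | [], _, _ => by simp [PySem.List.enumerate_nil, pvMuts]
  | c :: cs, s, t => by
    have ih := pvTailMutsD cs s (t + 1)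
    rw [List.map_cons, PySem.List.enumerate_cons, PySem.List.enumerate_cons]
    by_cases h : c = '-'
    · simp only [pvMuts, List.filter_cons, h]
      simpa [pvMuts, show s + t + 1 = s + (t + 1) by ring] using ih
    · simp only [pvMuts, List.filter_cons] at ih ⊢
      simp only [bne_iff_ne, ne_eq, h, not_false_iff]
      rw [show s + t + 1 = s + (t + 1) by ring] at *
      refine congrArg₂ _ ?_ ih
      simp [pvClassify, h]

-- the insertion tail's mutation list, in B's shape
theorem pvTailMutsI : ∀ (cs : List Char) (s t : Int),
    pvMuts (PySem.List.enumerate (cs.map (fun c => ('-', c))) (s + t))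
      = ((PySem.List.enumerate cs t).filter (fun p => p.2 != '-')).map
          (fun p => (s + p.1, "-", String.ofList [p.2], ("Insertion" : String)))
  | [], _, _ => by simp [PySem.List.enumerate_nil, pvMuts]
  | c :: cs, s, t => by
    have ih := pvTailMutsI cs s (t + 1)
    rw [List.map_cons, PySem.List.enumerate_cons, PySem.List.enumerate_cons]
    by_cases h : c = '-'
    · simp only [pvMuts, List.filter_cons, h]
      simpa [pvMuts, show s + t + 1 = s + (t + 1) by ring] using ih
    · simp only [pvMuts, List.filter_cons] at ih ⊢
      simp only [bne_iff_ne, ne_eq, Ne.symm h, not_false_iff, h]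
      rw [show s + t + 1 = s + (t + 1) by ring] at *
      refine congrArg₂ _ ?_ ih
      simp [pvClassify]

theorem pvMuts_append (xs ys : List (Int × Char × Char)) :
    pvMuts (xs ++ ys) = pvMuts xs ++ pvMuts ys := by
  simp [pvMuts, List.filter_append]

set_option maxHeartbeats 1600000 in
theorem compare_sequences_spec : Claim_equal_compare_sequences := by
  intro ref_seq var_seq _
  unfold Spec_compare_sequences
  rw [pvA_canon]
  unfold compare_sequences_alt
  simp only []
  set as := ref_seq.toList with has
  set bs := var_seq.toList with hbs
  set n : Nat := min as.length bs.length with hn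
  -- B's overlap loop in canonical form
  have hnz : n = (as.zip bs).length := by rw [List.length_zip]
  have hlenzip : ((n : Nat) : Int) = PySem.List.len (as.zip bs) := by
    simp [PySem.List.len, hnz]
  have hover :
      (PySem.List.pyRange 0 (n : Int) 1).foldl
        (fun (st : (List (Int × String × String × String)) × PySem.Dict String Int) i =>
          let r := PySem.List.pyGetD as i '-'
          let v := PySem.List.pyGetD bs i '-'
          if r != v then
            let t : String := if r = '-' then "Insertion" else if v = '-' then "Deletion" else "Substitution"
            (st.1 ++ [(i + 1, String.ofList [r], String.ofList [v], t)], st.2.insert t (st.2.getD t 0 + 1))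
          else st)
        ([], PySem.Dict.ofList [("Substitution", 0), ("Insertion", 0), ("Deletion", 0)])
      = (pvMuts (PySem.List.enumerate (as.zip bs) 1),
         (pvMuts (PySem.List.enumerate (as.zip bs) 1)).foldl pvIncr pvInit) := by
    rw [hlenzip]
    have hcongr :
        (PySem.List.pyRange 0 (PySem.List.len (as.zip bs)) 1).foldl
          (fun (st : (List (Int × String × String × String)) × PySem.Dict String Int) i =>
            let r := PySem.List.pyGetD as i '-'
            let v := PySem.List.pyGetD bs i '-'
            if r != v then
              let t : String := if r = '-' then "Insertion" else if v = '-' then "Deletion" else "Substitution"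
              (st.1 ++ [(i + 1, String.ofList [r], String.ofList [v], t)], st.2.insert t (st.2.getD t 0 + 1))
            else st)
          ([], PySem.Dict.ofList [("Substitution", 0), ("Insertion", 0), ("Deletion", 0)])
        = (PySem.List.pyRange 0 (PySem.List.len (as.zip bs)) 1).foldl
            (fun st i => pvStep st (i, PySem.List.pyGetD (as.zip bs) i ('-', '-')))
            ([], PySem.Dict.ofList [("Substitution", 0), ("Insertion", 0), ("Deletion", 0)]) := by
      apply PySem.List.foldl_congr_mem
      intro acc i hi
      have hb := (PySem.List.mem_pyRange_one).mp hi
      have h0 : (0 : Int) ≤ i := hb.1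
      have hub : i < PySem.List.len (as.zip bs) := hb.2
      have hub' : i.toNat < min as.length bs.length := by
        simp only [PySem.List.len, List.length_zip] at hub
        omega
      have hz : PySem.List.pyGetD (as.zip bs) i ('-', '-') = (as.getD i.toNat '-', bs.getD i.toNat '-') := by
        rw [PySem.List.pyGetD_of_nonneg _ ('-', '-') h0, pvZipPair_getD _ _ _ hub']
      have hr : PySem.List.pyGetD as i '-' = as.getD i.toNat '-' := PySem.List.pyGetD_of_nonneg as '-' h0
      have hv : PySem.List.pyGetD bs i '-' = bs.getD i.toNat '-' := PySem.List.pyGetD_of_nonneg bs '-' h0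
      simp only [hr, hv, pvStep, hz, pvClassify, bne_iff_ne, ne_eq]
      by_cases h : as.getD i.toNat '-' = bs.getD i.toNat '-'
      · simp [h]
      · simp [h]
    rw [hcongr]
    rw [show (PySem.List.pyRange 0 (PySem.List.len (as.zip bs)) 1).foldl
          (fun st i => pvStep st (i, PySem.List.pyGetD (as.zip bs) i ('-', '-')))
          ([], PySem.Dict.ofList [("Substitution", 0), ("Insertion", 0), ("Deletion", 0)])
        = (PySem.List.enumerate (as.zip bs) 0).foldl pvStep
          ([], PySem.Dict.ofList [("Substitution", 0), ("Insertion", 0), ("Deletion", 0)]) by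
      rw [PySem.List.enumerate_eq_map_pyRange (as.zip bs) ('-', '-'), List.foldl_map]]
    rw [pvFuse]
    simp only [pvInit, List.nil_append, zero_add]
  rw [hover]
  -- canonical A split by region
  rw [pvZip_split as bs, PySem.List.enumerate_append, pvMuts_append, List.foldl_append]
  set M1 := pvMuts (PySem.List.enumerate (as.zip bs) 1) with hM1
  set D1 := M1.foldl pvIncr pvInit with hD1
  have hcont : ∀ k : String, pvInit.contains k = true → D1.contains k = true := by
    intro k hk; exact pvContains_foldl k M1 pvInit hk
  have hnd : D1.keys.Nodup := by
    rw [hD1, show pvIncr = (fun (d : PySem.Dict String Int) (m : Int × String × String × String) =>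
      d.insert m.2.2.2 (d.getD m.2.2.2 0 + 1)) from rfl]
    exact PySem.Dict.nodup_keys_foldl_insert_key M1 (fun m => m.2.2.2)
      (fun d m => d.getD m.2.2.2 0 + 1) pvInit (by decide)
  have hzl : ((as.zip bs).length : Int) = (n : Int) := by rw [hnz]
  rcases Nat.lt_trichotomy bs.length as.length with hlt | heq | hgt
  · -- ref longer: deletion tail
    have hnb : n = bs.length := by omega
    have hdropb : bs.drop as.length = [] := by
      apply List.drop_eq_nil_of_le; omega
    have htail : pvZipLongest (as.drop bs.length) (bs.drop as.length)
        = (as.drop n).map (fun c => (c, '-')) := by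
      rw [hdropb, pvZip_left, hnb]
    rw [htail, hzl]
    rw [show (1 : Int) + (n : Int) = (n : Int) + 1 + 0 by ring]
    rw [pvTailMutsD (as.drop n) ((n : Int) + 1) 0]
    have hgtif : as.length > n := by omega
    simp only [if_pos hgtif]
    refine Prod.ext rfl ?_
    congr 1
    rw [pvFoldIncr_const "Deletion" _ D1 ?_ (hcont _ (by decide)) hnd]
    · congr 1
      rw [List.length_map, pvFilter_len (as.drop n) 0]
    · intro m hm
      rcases List.mem_map.mp hm with ⟨p, _, rfl⟩
      rfl
  · -- equal lengths: no tail
    have hdb : bs.drop as.length = [] := List.drop_eq_nil_of_le (by omega)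
    have hda : as.drop bs.length = [] := List.drop_eq_nil_of_le (by omega)
    rw [hda, hdb]
    simp only [pvZipLongest, PySem.List.enumerate_nil, pvMuts, List.filter_nil, List.map_nil,
      List.append_nil, List.foldl_nil]
    have h1 : ¬ as.length > n := by omega
    have h2 : ¬ bs.length > n := by omega
    simp [h1, h2]
  · -- var longer: insertion tail
    have hna : n = as.length := by omega
    have hdropa : as.drop bs.length = [] := by
      apply List.drop_eq_nil_of_le; omega
    have htail : pvZipLongest (as.drop bs.length) (bs.drop as.length)
        = (bs.drop n).map (fun c => ('-', c)) := by
      rw [hdropa, pvZip_right, hna]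
    rw [htail, hzl]
    rw [show (1 : Int) + (n : Int) = (n : Int) + 1 + 0 by ring]
    rw [pvTailMutsI (bs.drop n) ((n : Int) + 1) 0]
    have h1 : ¬ as.length > n := by omega
    have h2 : bs.length > n := by omega
    simp only [if_neg h1, if_pos h2]
    refine Prod.ext rfl ?_
    congr 1
    rw [pvFoldIncr_const "Insertion" _ D1 ?_ (hcont _ (by decide)) hnd]
    · congr 1
      rw [List.length_map, pvFilter_len (bs.drop n) 0]
    · intro m hm
      rcases List.mem_map.mp hm with ⟨p, _, rfl⟩
      rfl
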